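-- pv_equiv track=rewrite | github.com/Rudra2018/QuantumSentinel-Nexus | enhanced_comprehensive_dashboard.py | generate_recommendations
-- ===== SOURCE A (Python) =====
-- def generate_recommendations(findings):
--     """Generate security recommendations based on findings"""
--     recommendations = []
--
--     critical_count = len([f for f in findings if f.get("severity") == "critical"])
--     high_count = len([f for f in findings if f.get("severity") == "high"])
--
--     if critical_count > 0:
--         recommendations.append({
--             "priority": "critical",
--             "title": "Address Critical Security Issues",
--             "description": f"Found {critical_count} critical security issues requiring immediate attention"
--         })
--
--     if high_count > 0:
--         recommendations.append({
--             "priority": "high",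
--             "title": "Resolve High Severity Vulnerabilities",
--             "description": f"Found {high_count} high severity vulnerabilities that should be addressed promptly"
--         })
--
--     # Add specific recommendations based on finding types
--     finding_types = set(f.get("type", "") for f in findings)
--
--     if any("ssl" in ft.lower() for ft in finding_types):
--         recommendations.append({
--             "priority": "medium",
--             "title": "Improve SSL/TLS Configuration",
--             "description": "Review and strengthen SSL/TLS configuration"
--         })
--
--     if any("header" in ft.lower() for ft in finding_types):
--         recommendations.append({
--             "priority": "medium",
--             "title": "Implement Security Headers",
--             "description": "Add missing security headers to improve security posture"
--         })
--
--     return recommendations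
-- ===== SOURCE B (Python) =====
-- def generate_recommendations(findings):
--     """Generate security recommendations based on findings (single pass)."""
--     critical_count = 0
--     high_count = 0
--     has_ssl = False
--     has_header = False
--     for f in findings:
--         sev = f.get("severity")
--         if sev == "critical":
--             critical_count += 1
--         elif sev == "high":
--             high_count += 1
--         t = f.get("type", "").lower()
--         if "ssl" in t:
--             has_ssl = True
--         if "header" in t:
--             has_header = True
--
--     recommendations = []
--     if critical_count > 0:
--         recommendations.append({
--             "priority": "critical",
--             "title": "Address Critical Security Issues",
--             "description": f"Found {critical_count} critical security issues requiring immediate attention"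
--         })
--     if high_count > 0:
--         recommendations.append({
--             "priority": "high",
--             "title": "Resolve High Severity Vulnerabilities",
--             "description": f"Found {high_count} high severity vulnerabilities that should be addressed promptly"
--         })
--     if has_ssl:
--         recommendations.append({
--             "priority": "medium",
--             "title": "Improve SSL/TLS Configuration",
--             "description": "Review and strengthen SSL/TLS configuration"
--         })
--     if has_header:
--         recommendations.append({
--             "priority": "medium",
--             "title": "Implement Security Headers",
--             "description": "Add missing security headers to improve security posture"
--         })
--     return recommendations
-- ===== Notes on version B (the rewrite author's own statement) =====
-- stated objective: simpler
-- what changed: Replaces A's five traversals (two filtering comprehensions, a set comprehension and two any-scans over it) with one loop over findings accumulating two counters and two booleans, then assembles the same recommendation dicts in the same order.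
import Mathlib
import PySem

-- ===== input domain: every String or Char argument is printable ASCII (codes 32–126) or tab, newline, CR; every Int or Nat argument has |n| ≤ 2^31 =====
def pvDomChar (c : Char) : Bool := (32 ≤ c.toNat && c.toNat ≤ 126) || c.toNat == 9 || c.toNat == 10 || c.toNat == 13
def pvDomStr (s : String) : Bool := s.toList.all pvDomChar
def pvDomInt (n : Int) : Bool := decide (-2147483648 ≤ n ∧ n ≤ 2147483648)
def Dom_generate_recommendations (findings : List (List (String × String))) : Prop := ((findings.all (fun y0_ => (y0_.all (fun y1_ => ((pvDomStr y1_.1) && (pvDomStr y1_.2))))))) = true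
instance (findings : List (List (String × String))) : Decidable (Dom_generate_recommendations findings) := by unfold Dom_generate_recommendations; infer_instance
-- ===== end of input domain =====

-- B replaces A's five traversals with one accumulating loop; the return value is identical.

-- ===== PORT A =====
def critRec (n : Int) : List (String × String) :=
  [("priority", "critical"),
   ("title", "Address Critical Security Issues"),
   ("description", "Found " ++ PySem.Int.toStr n ++ " critical security issues requiring immediate attention")]

def highRec (n : Int) : List (String × String) :=
  [("priority", "high"),
   ("title", "Resolve High Severity Vulnerabilities"),
   ("description", "Found " ++ PySem.Int.toStr n ++ " high severity vulnerabilities that should be addressed promptly")]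

def sslRec : List (String × String) :=
  [("priority", "medium"),
   ("title", "Improve SSL/TLS Configuration"),
   ("description", "Review and strengthen SSL/TLS configuration")]

def headerRec : List (String × String) :=
  [("priority", "medium"),
   ("title", "Implement Security Headers"),
   ("description", "Add missing security headers to improve security posture")]

def generate_recommendations (findings : List (List (String × String))) : List (List (String × String)) :=
  let recommendations : List (List (String × String)) := []
  let critical_count : Int :=
    ((findings.filter (fun f => f.lookup "severity" == some "critical")).length : Int)
  let high_count : Int :=
    ((findings.filter (fun f => f.lookup "severity" == some "high")).length : Int)
  let recommendations :=
    if critical_count > 0 then recommendations ++ [critRec critical_count] else recommendations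
  let recommendations :=
    if high_count > 0 then recommendations ++ [highRec high_count] else recommendations
  let finding_types := PySem.Set.ofList (findings.map (fun f => ((f.lookup "type").getD "")))
  let recommendations :=
    if finding_types.any (fun ft => PySem.Str.isIn "ssl" (PySem.Str.lower ft)) then
      recommendations ++ [sslRec] else recommendations
  let recommendations :=
    if finding_types.any (fun ft => PySem.Str.isIn "header" (PySem.Str.lower ft)) then
      recommendations ++ [headerRec] else recommendations
  recommendations

-- ===== PORT B =====
def altStep (st : Int × Int × Bool × Bool) (f : List (String × String)) : Int × Int × Bool × Bool :=
  let sev := f.lookup "severity"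
  let ch : Int × Int :=
    if sev == some "critical" then (st.1 + 1, st.2.1)
    else if sev == some "high" then (st.1, st.2.1 + 1)
    else (st.1, st.2.1)
  let t := PySem.Str.lower (((f.lookup "type").getD ""))
  (ch.1, ch.2,
   st.2.2.1 || PySem.Str.isIn "ssl" t,
   st.2.2.2 || PySem.Str.isIn "header" t)

def generate_recommendations_alt (findings : List (List (String × String))) : List (List (String × String)) :=
  let st := findings.foldl altStep (0, 0, false, false)
  let recommendations : List (List (String × String)) := []
  let recommendations := if st.1 > 0 then recommendations ++ [critRec st.1] else recommendations
  let recommendations := if st.2.1 > 0 then recommendations ++ [highRec st.2.1] else recommendations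
  let recommendations := if st.2.2.1 then recommendations ++ [sslRec] else recommendations
  let recommendations := if st.2.2.2 then recommendations ++ [headerRec] else recommendations
  recommendations

-- ===== PRECONDITION & SPEC =====
def Spec_generate_recommendations (findings : List (List (String × String))) (out : List (List (String × String))) : Prop := out = generate_recommendations_alt findings
instance (findings : List (List (String × String))) (out : List (List (String × String))) : Decidable (Spec_generate_recommendations findings out) := by unfold Spec_generate_recommendations; infer_instance

-- ===== CLAIM (what is proved, stated in full; the proofs are below) =====
def Claim_equal_generate_recommendations : Prop := ∀ (findings : List (List (String × String))), Dom_generate_recommendations findings → Spec_generate_recommendations findings (generate_recommendations findings)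

-- ===== LEMMAS AND PROOFS =====

-- any over the deduplicated set of types equals any over the raw list of types
theorem any_ofList {α : Type} [DecidableEq α] (l : List α) (p : α → Bool) :
    (PySem.Set.ofList l).any p = l.any p := by
  apply Bool.eq_iff_iff.mpr
  simp only [List.any_eq_true]
  constructor
  · rintro ⟨x, hx, hp⟩
    exact ⟨x, (PySem.Set.mem_ofList l x).mp hx, hp⟩
  · rintro ⟨x, hx, hp⟩
    exact ⟨x, (PySem.Set.mem_ofList l x).mpr hx, hp⟩

-- the single fold computes all four of A's separate aggregates at once
theorem foldl_altStep (findings : List (List (String × String)))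
    (c h : Int) (s d : Bool) :
    findings.foldl altStep (c, h, s, d) =
      (c + ((findings.filter (fun f => f.lookup "severity" == some "critical")).length : Int),
       h + ((findings.filter (fun f => f.lookup "severity" == some "high")).length : Int),
       s || findings.any (fun f => PySem.Str.isIn "ssl" (PySem.Str.lower (((f.lookup "type").getD "")))),
       d || findings.any (fun f => PySem.Str.isIn "header" (PySem.Str.lower (((f.lookup "type").getD ""))))) := by
  induction findings generalizing c h s d with
  | nil => simp
  | cons f rest ih =>
    simp only [List.foldl_cons, List.filter_cons, List.any_cons, altStep]
    by_cases hc : f.lookup "severity" == some "critical"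
    · have hh : ¬ (f.lookup "severity" == some "high") := by
        simp_all
      simp only [hc, hh, if_pos, ih]
      simp [Bool.or_assoc]
      omega
    · by_cases hh : f.lookup "severity" == some "high"
      · simp only [hc, hh, if_pos, ih]
        simp [Bool.or_assoc]
        omega
      · simp only [hc, hh, ih]
        simp [Bool.or_assoc]

-- ===== VERDICT (by name: the statement is the Claim_ definition above) =====
theorem generate_recommendations_spec : Claim_equal_generate_recommendations := by
  intro findings _
  show generate_recommendations findings = generate_recommendations_alt findings
  unfold generate_recommendations generate_recommendations_alt
  rw [foldl_altStep]
  simp [any_ofList, List.any_map, Function.comp_def]
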